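-- pv_equiv track=rewrite | github.com/SGSMarkNA/GENERAL_TOOLS | csv_utils.py | find_largest_row_lenght
-- ===== SOURCE A (Python) =====
-- def find_largest_row_lenght(csv):
-- 	largest_lenght = 0
-- 	for r in csv:
-- 		for index,row in enumerate(r):
-- 			if row != None:
-- 				if index > largest_lenght:
-- 					largest_lenght = index
-- 	return largest_lenght
-- ===== SOURCE B (Python) =====
-- def find_largest_row_lenght(csv):
-- 	largest_lenght = 0
-- 	for r in csv:
-- 		v = 0
-- 		for i in range(len(r) - 1, -1, -1):
-- 			if r[i] != None:
-- 				v = i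
-- 				break
-- 		if v > largest_lenght:
-- 			largest_lenght = v
-- 	return largest_lenght
-- ===== Notes on version B (the rewrite author's own statement) =====
-- stated objective: alternative
-- what changed: Instead of scanning every cell of every row with enumerate and updating a running maximum, B scans each row backwards and stops at the first non-None cell, taking that index as the row's value, then keeps the maximum of the per-row values.
import Mathlib
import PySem

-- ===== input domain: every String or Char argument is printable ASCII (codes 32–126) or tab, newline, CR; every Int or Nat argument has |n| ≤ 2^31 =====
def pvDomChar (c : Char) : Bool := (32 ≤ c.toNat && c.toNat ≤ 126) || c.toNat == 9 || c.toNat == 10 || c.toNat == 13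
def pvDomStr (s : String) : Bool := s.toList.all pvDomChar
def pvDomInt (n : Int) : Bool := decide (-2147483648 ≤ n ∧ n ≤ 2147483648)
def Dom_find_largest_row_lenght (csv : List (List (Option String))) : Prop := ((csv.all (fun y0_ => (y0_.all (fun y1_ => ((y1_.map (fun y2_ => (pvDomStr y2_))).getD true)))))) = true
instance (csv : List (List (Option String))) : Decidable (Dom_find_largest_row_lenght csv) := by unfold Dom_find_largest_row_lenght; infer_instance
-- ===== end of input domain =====

-- B replaces A's full enumerate-scan of every row by a backwards scan of each row that
-- stops at the first non-None cell (alternative decomposition, same exact result).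


-- ===== PORT A =====
-- for r in csv: for index,row in enumerate(r): if row != None and index > largest: largest = index
def find_largest_row_lenght (csv : List (List (Option String))) : Int :=
  csv.foldl
    (fun largest r =>
      (PySem.List.enumerate r).foldl
        (fun acc p => if p.2 ≠ none then (if p.1 > acc then p.1 else acc) else acc)
        largest)
    0

-- ===== PORT B =====
-- for i in range(len(r)-1, -1, -1): if r[i] != None: v = i; break   — scan the row from the back;
-- rowScan walks the REVERSED row carrying the current index i, stopping at the first non-None cell.
def rowScan : List (Option String) → Int → Int
  | [], _ => 0
  | x :: xs, i => if x ≠ none then i else rowScan xs (i - 1)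

def find_largest_row_lenght_alt (csv : List (List (Option String))) : Int :=
  csv.foldl
    (fun largest r =>
      let v := rowScan r.reverse ((r.length : Int) - 1)
      if v > largest then v else largest)
    0

-- ===== PRECONDITION & SPEC =====
def Spec_find_largest_row_lenght (csv : List (List (Option String))) (out : Int) : Prop := out = find_largest_row_lenght_alt csv
instance (csv : List (List (Option String))) (out : Int) : Decidable (Spec_find_largest_row_lenght csv out) := by unfold Spec_find_largest_row_lenght; infer_instance

-- ===== CLAIM (what is proved, stated in full; the proofs are below) =====
def Claim_equal_find_largest_row_lenght : Prop := ∀ (csv : List (List (Option String))), Dom_find_largest_row_lenght csv → Spec_find_largest_row_lenght csv (find_largest_row_lenght csv)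

-- ===== LEMMAS AND PROOFS =====

-- index of the LAST non-None entry of a row (none if the row has no non-None entry)
def lastIdx : List (Option String) → Option Nat
  | [] => none
  | x :: xs =>
    match lastIdx xs with
    | some k => some (k + 1)
    | none => if x ≠ none then some 0 else none

theorem lastIdx_append_singleton (l : List (Option String)) (x : Option String) :
    lastIdx (l ++ [x]) = if x ≠ none then some l.length else lastIdx l := by
  induction l with
  | nil => simp [lastIdx]
  | cons y ys ih =>
    simp only [List.cons_append, lastIdx, ih, List.length_cons]
    cases lastIdx ys with
    | none => by_cases hx : x = none <;> simp [hx]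
    | some k => by_cases hx : x = none <;> simp [hx]

-- B's per-row backwards scan computes the last non-None index (0 when there is none)
theorem rowScan_reverse (l : List (Option String)) :
    rowScan l.reverse ((l.length : Int) - 1) =
      match lastIdx l with
      | some k => (k : Int)
      | none => 0 := by
  induction l using List.reverseRecOn with
  | nil => simp [rowScan, lastIdx]
  | append_singleton l x ih =>
    rw [List.reverse_append, lastIdx_append_singleton]
    by_cases hx : x = none
    · simpa [rowScan, hx, add_sub_cancel_right] using ih
    · simp [rowScan, hx]

-- A's inner enumerate loop, starting at index s, is "max of acc and s + last non-None index"
theorem innerA_eq (l : List (Option String)) :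
    ∀ (s acc : Int), 0 ≤ s → 0 ≤ acc →
    (PySem.List.enumerate l s).foldl
        (fun acc p => if p.2 ≠ none then (if p.1 > acc then p.1 else acc) else acc) acc =
      match lastIdx l with
      | some k => max acc (s + (k : Int))
      | none => acc := by
  induction l with
  | nil => intro s acc _ _; simp [PySem.List.enumerate_nil, lastIdx]
  | cons x xs ih =>
    intro s acc hs hacc
    rw [PySem.List.enumerate_cons, List.foldl_cons]
    have h := ih (s + 1) (if x ≠ none then (if s > acc then s else acc) else acc)
      (by omega) (by split <;> first | (split <;> omega) | omega)
    cases hxs : lastIdx xs with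
    | some k =>
      simp only [hxs] at h
      have hg : lastIdx (x :: xs) = some (k + 1) := by simp [lastIdx, hxs]
      rw [hg, h]
      dsimp only
      have hc : ((k + 1 : Nat) : Int) = (k : Int) + 1 := by omega
      rw [hc]
      simp only [max_def]
      split_ifs <;> linarith
    | none =>
      simp only [hxs] at h
      by_cases hx : x = none
      · have hg : lastIdx (x :: xs) = none := by simp [lastIdx, hxs, hx]
        rw [hg, h]
        dsimp only
        simp [hx]
      · have hg : lastIdx (x :: xs) = some 0 := by simp [lastIdx, hxs, hx]
        rw [hg, h]
        dsimp only
        simp only [hx, ne_eq, not_false_eq_true, if_true, Nat.cast_zero, add_zero, max_def]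
        split_ifs <;> omega

-- the two outer folds agree for every nonnegative accumulator
theorem folds_eq (csv : List (List (Option String))) :
    ∀ (acc : Int), 0 ≤ acc →
    csv.foldl
      (fun largest r =>
        (PySem.List.enumerate r).foldl
          (fun acc p => if p.2 ≠ none then (if p.1 > acc then p.1 else acc) else acc)
          largest) acc =
    csv.foldl
      (fun largest r =>
        let v := rowScan r.reverse ((r.length : Int) - 1)
        if v > largest then v else largest) acc := by
  induction csv with
  | nil => intro acc _; rfl
  | cons r rs ih =>
    intro acc hacc
    rw [List.foldl_cons, List.foldl_cons]
    have hstep :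
        (PySem.List.enumerate r).foldl
          (fun acc p => if p.2 ≠ none then (if p.1 > acc then p.1 else acc) else acc) acc =
        (let v := rowScan r.reverse ((r.length : Int) - 1); if v > acc then v else acc) := by
      rw [innerA_eq r 0 acc le_rfl hacc, rowScan_reverse]
      cases lastIdx r with
      | none => simp; omega
      | some k =>
        have : (0 : Int) ≤ (k : Int) := Int.natCast_nonneg k
        simp only [zero_add, max_def]
        split <;> split <;> omega
    rw [hstep]
    exact ih _ (by dsimp only; split <;> omega)

-- ===== VERDICT (by name: the statement is the Claim_ definition above) =====
theorem find_largest_row_lenght_spec : Claim_equal_find_largest_row_lenght := by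
  intro csv _
  unfold Spec_find_largest_row_lenght find_largest_row_lenght find_largest_row_lenght_alt
  exact folds_eq csv 0 le_rfl
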